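-- pv_equiv track=rewrite | github.com/maralshahmizad/Political-Districting-to-Maximize-Whole-Counties | src/util.py | number_of_county_splits
-- ===== SOURCE A (Python) =====
-- def number_of_county_splits(districts_geoid):
--     county_geoids = { geoid[0:5] for district in districts_geoid for geoid in district }
--     county_assignment = { county_geoid : list() for county_geoid in county_geoids }
--     for j in range(len(districts_geoid)):
--         for geoid in districts_geoid[j]:
--             county_geoid = geoid[0:5]
--             if j not in county_assignment[county_geoid]:
--                 county_assignment[county_geoid].append(j)
--     return sum( len(county_assignment[cg]) - 1 for cg in county_assignment.keys() )
-- ===== SOURCE B (Python) =====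
-- def number_of_county_splits(districts_geoid):
--     seen = set()
--     splits = 0
--     for district in districts_geoid:
--         counties = {geoid[0:5] for geoid in district}
--         splits += len(counties & seen)
--         seen |= counties
--     return splits
-- ===== Notes on version B (the rewrite author's own statement) =====
-- stated objective: simpler
-- what changed: Replaces A's per-county assignment dict (membership-checked append loop plus a final sum(len-1) pass) by one streaming pass over districts that keeps only the set of counties seen so far and adds, per district, the number of its counties already seen (each re-encounter of a county is exactly one split).
import Mathlib
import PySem

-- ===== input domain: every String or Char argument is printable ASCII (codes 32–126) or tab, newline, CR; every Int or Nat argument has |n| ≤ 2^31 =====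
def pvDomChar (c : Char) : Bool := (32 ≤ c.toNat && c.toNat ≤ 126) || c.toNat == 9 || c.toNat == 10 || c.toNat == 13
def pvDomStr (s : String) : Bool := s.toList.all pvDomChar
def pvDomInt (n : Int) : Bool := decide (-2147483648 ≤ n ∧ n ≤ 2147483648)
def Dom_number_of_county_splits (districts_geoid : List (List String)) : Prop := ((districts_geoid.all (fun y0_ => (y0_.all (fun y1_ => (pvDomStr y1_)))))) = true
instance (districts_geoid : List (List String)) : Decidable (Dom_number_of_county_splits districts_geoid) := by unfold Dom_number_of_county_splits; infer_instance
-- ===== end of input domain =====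

-- B replaces A's per-county assignment dict (membership-checked append loop + sum(len-1) pass) by one
-- streaming pass that keeps only the set of counties seen so far and counts re-encounters; objective: simpler.

-- ===== PORT A =====
def number_of_county_splits (districts_geoid : List (List String)) : Int :=
  let county_geoids : PySem.Set String :=
    PySem.Set.ofList (districts_geoid.flatMap (fun district =>
      district.map (fun geoid => PySem.Str.slice geoid (some 0) (some 5))))
  let county_assignment : PySem.Dict String (List Int) :=
    county_geoids.foldl (fun d county_geoid => d.insert county_geoid []) PySem.Dict.empty
  -- 'county_assignment[county_geoid]' never raises (every county is a key), so getD [] is exact here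
  let county_assignment :=
    (PySem.List.pyRange 0 (PySem.List.len districts_geoid)).foldl (fun d j =>
      (PySem.List.pyGetD districts_geoid j []).foldl (fun d geoid =>
        let county_geoid := PySem.Str.slice geoid (some 0) (some 5)
        if (d.getD county_geoid []).contains j then d
        else d.modify county_geoid [] (fun js => js ++ [j])) d) county_assignment
  (county_assignment.keys.map (fun cg =>
    ((county_assignment.getD cg []).length : Int) - 1)).sum

-- ===== PORT B =====
-- one pass: seen = counties of earlier districts; 'len(counties & seen)' → length of PySem.Set.inter
def number_of_county_splits_alt (districts_geoid : List (List String)) : Int :=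
  (districts_geoid.foldl (fun st district =>
      let counties : PySem.Set String :=
        PySem.Set.ofList (district.map (fun geoid => PySem.Str.slice geoid (some 0) (some 5)))
      (PySem.Set.update st.1 counties, st.2 + ((PySem.Set.inter counties st.1).length : Int)))
    ((PySem.Set.empty : PySem.Set String), (0 : Int))).2

-- ===== PRECONDITION & SPEC =====
def Spec_number_of_county_splits (districts_geoid : List (List String)) (out : Int) : Prop := out = number_of_county_splits_alt districts_geoid
instance (districts_geoid : List (List String)) (out : Int) : Decidable (Spec_number_of_county_splits districts_geoid out) := by unfold Spec_number_of_county_splits; infer_instance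

-- ===== CLAIM (what is proved, stated in full; the proofs are below) =====
def Claim_equal_number_of_county_splits : Prop := ∀ (districts_geoid : List (List String)), Dom_number_of_county_splits districts_geoid → Spec_number_of_county_splits districts_geoid (number_of_county_splits districts_geoid)

-- ===== LEMMAS AND PROOFS =====

-- proof-side names for the pieces of the two ports
def pvKey (g : String) : String := PySem.Str.slice g (some 0) (some 5)

def pvStepA (d : PySem.Dict String (List Int)) (p : String × Int) : PySem.Dict String (List Int) :=
  if (d.getD p.1 []).contains p.2 then d else d.modify p.1 [] (fun js => js ++ [p.2])

def pvStepB (st : PySem.Set String × Int) (district : List String) : PySem.Set String × Int :=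
  let counties : PySem.Set String := PySem.Set.ofList (district.map pvKey)
  (PySem.Set.update st.1 counties, st.2 + ((PySem.Set.inter counties st.1).length : Int))

def pvPairs (ds : List (List String)) : List (String × Int) :=
  (PySem.List.enumerate ds).flatMap (fun ji => ji.2.map (fun g => (pvKey g, ji.1)))

def pvCfin (d : List String) : Finset String := (d.map pvKey).toFinset

def pvUfin (ds : List (List String)) : Finset String := (ds.flatMap (fun d => d.map pvKey)).toFinset

lemma pv_enum_cons (x : List String) (xs : List (List String)) (s : Int) :
    PySem.List.enumerate (x :: xs) s = (s, x) :: PySem.List.enumerate xs (s + 1) := rfl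

-- the second components of enumerate are the list itself
lemma pv_flatMap_enum (F : List String → List String) :
    ∀ (ds : List (List String)) (s : Int),
      (PySem.List.enumerate ds s).flatMap (fun ji => F ji.2) = ds.flatMap F := by
  intro ds
  induction ds with
  | nil => intro s; rfl
  | cons x t ih => intro s; rw [pv_enum_cons]; simp only [List.flatMap_cons, ih]

lemma pv_pairs_map_fst (ds : List (List String)) :
    (pvPairs ds).map (fun p => p.1) = ds.flatMap (fun dd => dd.map pvKey) := by
  unfold pvPairs
  rw [List.map_flatMap]
  have h : (fun ji : Int × List String => (ji.2.map (fun g => (pvKey g, ji.1))).map (fun p => p.1))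
      = fun ji : Int × List String => ji.2.map pvKey := by
    funext ji; simp
  rw [h]
  exact pv_flatMap_enum (fun dd => dd.map pvKey) ds 0

-- A's indexed double loop is the fold of pvStepA over the pair list
lemma pv_loop_enum : ∀ (ds pre : List (List String)) (d : PySem.Dict String (List Int)),
    (List.range' pre.length ds.length).foldl (fun d k =>
        ((pre ++ ds).getD k []).foldl (fun d g => pvStepA d (pvKey g, (k : Int))) d) d
      = ((PySem.List.enumerate ds (pre.length : Int)).flatMap
          (fun ji => ji.2.map (fun g => (pvKey g, ji.1)))).foldl pvStepA d := by
  intro ds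
  induction ds with
  | nil => intro pre d; rfl
  | cons x t ih =>
    intro pre d
    rw [pv_enum_cons, List.length_cons, List.range'_succ, List.foldl_cons, List.flatMap_cons,
        List.foldl_append, List.foldl_map]
    have hget : (pre ++ x :: t).getD pre.length [] = x := by
      rw [List.getD_eq_getElem?_getD, List.getElem?_append_right (Nat.le_refl _)]
      simp
    rw [hget]
    have := ih (pre ++ [x]) (x.foldl (fun d g => pvStepA d (pvKey g, (pre.length : Int))) d)
    rw [List.length_append, List.length_singleton] at this
    rw [List.append_assoc] at this
    simpa using this

lemma pv_loopA_eq (ds : List (List String)) (d : PySem.Dict String (List Int)) :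
    (List.range ds.length).foldl (fun d k =>
        (ds.getD k []).foldl (fun d g => pvStepA d (pvKey g, (k : Int))) d) d
      = (pvPairs ds).foldl pvStepA d := by
  have := pv_loop_enum ds [] d
  simpa [List.range_eq_range', pvPairs] using this

-- value of the assignment dict after the loop: the distinct district indices of that county, in order
lemma pv_fold_getD : ∀ (l : List (String × Int)) (d : PySem.Dict String (List Int)) (c : String),
    ((l.foldl pvStepA d).getD c []) =
      PySem.Set.update (d.getD c []) ((l.filter (fun p => p.1 == c)).map (fun p => p.2)) := by
  intro l
  induction l with
  | nil => intro d c; rfl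
  | cons p t ih =>
    intro d c
    obtain ⟨c', j⟩ := p
    rw [List.foldl_cons, List.filter_cons]
    by_cases hc : c' = c
    · subst hc
      simp only [beq_self_eq_true, if_pos, List.map_cons]
      have hupd : ∀ (s : PySem.Set Int) (js : List Int),
          PySem.Set.update s (j :: js) = PySem.Set.update (PySem.Set.add s j) js := fun _ _ => rfl
      rw [hupd]
      by_cases hj : (d.getD c' []).contains j = true
      · have hj' : j ∈ d.getD c' [] := by simpa using hj
        have hstep : pvStepA d (c', j) = d := by simp [pvStepA, hj']
        have hadd : PySem.Set.add (d.getD c' []) j = d.getD c' [] := by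
          simp [PySem.Set.add, PySem.Set.contains, hj']
        rw [hstep, hadd, ih]
      · have hj' : j ∉ d.getD c' [] := by simpa using hj
        have hstep : pvStepA d (c', j) = d.modify c' [] (fun js => js ++ [j]) := by
          simp [pvStepA, hj']
        have hadd : PySem.Set.add (d.getD c' []) j = d.getD c' [] ++ [j] := by
          simp only [PySem.Set.add, PySem.Set.contains]
          rw [if_neg (by simpa using hj)]
        rw [hstep, ih, PySem.Dict.getD_modify_self, hadd]
    · have hbeq : ((c', j).1 == c) = false := by simpa using hc
      simp only [hbeq, Bool.false_eq_true, if_neg, not_false_eq_true]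
      rw [ih]
      have hfix : (pvStepA d (c', j)).getD c [] = d.getD c [] := by
        unfold pvStepA
        split
        · rfl
        · exact PySem.Dict.getD_modify_of_ne d [] _ (fun h => hc h.symm)
      rw [hfix]

-- the loop never adds keys
lemma pv_keys_fold : ∀ (l : List (String × Int)) (d : PySem.Dict String (List Int)),
    (∀ p ∈ l, p.1 ∈ d.keys) → (l.foldl pvStepA d).keys = d.keys := by
  intro l
  induction l with
  | nil => intro d _; rfl
  | cons p t ih =>
    intro d h
    rw [List.foldl_cons]
    have hkeys : (pvStepA d p).keys = d.keys := by
      unfold pvStepA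
      split
      · rfl
      · rw [PySem.Dict.keys_modify]
        exact PySem.Dict.keys_insert_of_contains _ _
          ((PySem.Dict.contains_iff_mem_keys d p.1).mpr (h p (List.mem_cons_self)))
    rw [ih _ (fun q hq => by rw [hkeys]; exact h q (List.mem_cons_of_mem _ hq)), hkeys]

lemma pv_init_getD : ∀ (K : List String) (d : PySem.Dict String (List Int)),
    (∀ c, d.getD c [] = []) → ∀ c, (K.foldl (fun d cg => d.insert cg []) d).getD c [] = [] := by
  intro K
  induction K with
  | nil => intro d h c; exact h c
  | cons cg t ih =>
    intro d h c
    rw [List.foldl_cons]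
    exact ih _ (fun c' => by rw [PySem.Dict.getD_insert]; split <;> simp [h]) c

lemma pv_update_append_nodup {α : Type} [BEq α] [LawfulBEq α] :
    ∀ (l : List α) (s : PySem.Set α), (s ++ l).Nodup → PySem.Set.update s l = s ++ l := by
  intro l
  induction l with
  | nil => intro s _; simp [PySem.Set.update]
  | cons x t ih =>
    intro s h
    have hx : x ∉ s := by
      rw [List.nodup_append] at h
      exact fun hmem => h.2.2 x hmem x List.mem_cons_self rfl
    have hupd : PySem.Set.update s (x :: t) = PySem.Set.update (PySem.Set.add s x) t := rfl
    have hadd : PySem.Set.add s x = s ++ [x] := by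
      simp only [PySem.Set.add, PySem.Set.contains]
      rw [if_neg (by simpa using hx)]
    rw [hupd, hadd, ih (s ++ [x]) (by simpa using h)]
    simp

lemma pv_setCard {α : Type} [BEq α] [LawfulBEq α] [DecidableEq α] (l : List α) :
    (PySem.Set.ofList l).length = l.toFinset.card := by
  have h2 : (PySem.Set.ofList l).toFinset = l.toFinset := by
    ext x; simp [List.mem_toFinset, PySem.Set.mem_ofList]
  rw [← List.toFinset_card_of_nodup (PySem.Set.nodup_ofList l), h2]

-- the counting identity: distinct pairs, grouped by county
lemma pv_count (P : List (String × Int)) (K : List String) (hnd : K.Nodup)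
    (hK : K.toFinset = (P.map (fun p => p.1)).toFinset) :
    (K.map (fun c => ((PySem.Set.ofList ((P.filter (fun p => p.1 == c)).map (fun p => p.2))).length : Int))).sum
      = ((PySem.Set.ofList P).length : Int) := by
  have key : ∀ c, (PySem.Set.ofList ((P.filter (fun p => p.1 == c)).map (fun p => p.2))).length
      = ({a ∈ P.toFinset | a.1 = c}).card := by
    intro c
    rw [pv_setCard]
    have himg : ((P.filter (fun p => p.1 == c)).map (fun p => p.2)).toFinset
        = ({a ∈ P.toFinset | a.1 = c}).image (fun p => p.2) := by
      ext j
      simp only [List.mem_toFinset, List.mem_map, List.mem_filter, Finset.mem_image,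
        Finset.mem_filter, beq_iff_eq]
    rw [himg, Finset.card_image_of_injOn]
    intro a ha b hb hab
    simp only [Finset.coe_filter, Set.mem_setOf_eq] at ha hb
    exact Prod.ext (ha.2.trans hb.2.symm) hab
  have hsum : (K.map (fun c =>
      ((PySem.Set.ofList ((P.filter (fun p => p.1 == c)).map (fun p => p.2))).length : Int))).sum
      = ((K.map (fun c =>
      (PySem.Set.ofList ((P.filter (fun p => p.1 == c)).map (fun p => p.2))).length)).sum : Int) := by
    rw [Nat.cast_list_sum, List.map_map]; rfl
  rw [hsum, pv_setCard]
  congr 1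
  rw [← List.sum_toFinset _ hnd, hK]
  have himage : (P.map (fun p => p.1)).toFinset = P.toFinset.image (fun p => p.1) := by
    ext c; simp
  rw [himage]
  have := Finset.card_eq_sum_card_image (fun p : String × Int => p.1) P.toFinset
  rw [this]
  exact Finset.sum_congr rfl (fun c _ => key c)

lemma pv_sum_sub_one (K : List String) (f : String → Int) :
    (K.map (fun c => f c - 1)).sum = (K.map f).sum - K.length := by
  induction K with
  | nil => simp
  | cons a t ih =>
    simp only [List.map_cons, List.sum_cons, List.length_cons, ih]
    push_cast
    ring

-- A's value: distinct (county, district) pairs minus distinct counties (both as Finset cards)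
lemma pv_A_val (ds : List (List String)) :
    number_of_county_splits ds
      = ((pvPairs ds).toFinset.card : Int) - ((ds.flatMap (fun dd => dd.map pvKey)).toFinset.card : Int) := by
  have hAdef : number_of_county_splits ds =
      ((List.foldl (fun d j => List.foldl (fun d g => pvStepA d (pvKey g, j)) d
            (PySem.List.pyGetD ds j []))
          (List.foldl (fun d c => d.insert c ([] : List Int)) PySem.Dict.empty
            (PySem.Set.ofList (ds.flatMap (fun dd => dd.map pvKey))))
          (PySem.List.pyRange 0 (PySem.List.len ds))).keys.map (fun cg =>
        (((List.foldl (fun d j => List.foldl (fun d g => pvStepA d (pvKey g, j)) d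
            (PySem.List.pyGetD ds j []))
          (List.foldl (fun d c => d.insert c ([] : List Int)) PySem.Dict.empty
            (PySem.Set.ofList (ds.flatMap (fun dd => dd.map pvKey))))
          (PySem.List.pyRange 0 (PySem.List.len ds))).getD cg []).length : Int) - 1)).sum := rfl
  rw [hAdef]
  have hfst : (pvPairs ds).map (fun p => p.1) = ds.flatMap (fun dd => dd.map pvKey) :=
    pv_pairs_map_fst ds
  have hKnodup : (PySem.Set.ofList (ds.flatMap (fun dd => dd.map pvKey))).Nodup :=
    PySem.Set.nodup_ofList _
  have h1 : PySem.List.pyRange 0 (PySem.List.len ds) = (List.range ds.length).map (fun k : Nat => (k : Int)) := by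
    have hlen : PySem.List.len ds = ((ds.length : Nat) : Int) := rfl
    rw [hlen, PySem.List.pyRange_zero_natCast]
  have h2 : (List.foldl (fun d j => List.foldl (fun d g => pvStepA d (pvKey g, j)) d
        (PySem.List.pyGetD ds j []))
      (List.foldl (fun d c => d.insert c ([] : List Int)) PySem.Dict.empty
        (PySem.Set.ofList (ds.flatMap (fun dd => dd.map pvKey))))
      (PySem.List.pyRange 0 (PySem.List.len ds)))
      = (pvPairs ds).foldl pvStepA
        (List.foldl (fun d c => d.insert c ([] : List Int)) PySem.Dict.empty
          (PySem.Set.ofList (ds.flatMap (fun dd => dd.map pvKey)))) := by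
    rw [h1, List.foldl_map]
    rw [← pv_loopA_eq]
    apply PySem.List.foldl_congr_mem
    intro acc k _
    rw [PySem.List.pyGetD_natCast]
  rw [h2]
  have hkeys0 : (List.foldl (fun d c => d.insert c ([] : List Int)) PySem.Dict.empty
      (PySem.Set.ofList (ds.flatMap (fun dd => dd.map pvKey)))).keys
      = PySem.Set.ofList (ds.flatMap (fun dd => dd.map pvKey)) := by
    have hk := PySem.Dict.keys_foldl_insert
      (PySem.Set.ofList (ds.flatMap (fun dd => dd.map pvKey)))
      (fun _ _ => ([] : List Int)) PySem.Dict.empty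
    have hu := pv_update_append_nodup
      (PySem.Set.ofList (ds.flatMap (fun dd => dd.map pvKey))) [] (by simp [hKnodup])
    simpa [PySem.Dict.keys_empty, hu] using hk
  have hmem : ∀ p ∈ pvPairs ds, p.1 ∈ (List.foldl (fun d c => d.insert c ([] : List Int))
      PySem.Dict.empty (PySem.Set.ofList (ds.flatMap (fun dd => dd.map pvKey)))).keys := by
    intro p hp
    rw [hkeys0]
    have hmm : p.1 ∈ (pvPairs ds).map (fun p => p.1) := List.mem_map_of_mem hp
    rw [hfst] at hmm
    exact (PySem.Set.mem_ofList _ _).mpr hmm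
  have hkeysfin := pv_keys_fold (pvPairs ds) _ hmem
  rw [hkeysfin, hkeys0]
  have hgetD : ∀ cg, ((pvPairs ds).foldl pvStepA
      (List.foldl (fun d c => d.insert c ([] : List Int)) PySem.Dict.empty
        (PySem.Set.ofList (ds.flatMap (fun dd => dd.map pvKey))))).getD cg []
      = PySem.Set.ofList (((pvPairs ds).filter (fun p => p.1 == cg)).map (fun p => p.2)) := by
    intro cg
    rw [pv_fold_getD]
    have h0 := pv_init_getD (PySem.Set.ofList (ds.flatMap (fun dd => dd.map pvKey)))
      PySem.Dict.empty (fun c => by simp [PySem.Dict.getD_empty]) cg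
    rw [h0]
    rfl
  simp only [hgetD]
  rw [pv_sum_sub_one _ (fun cg =>
    ((PySem.Set.ofList (((pvPairs ds).filter (fun p => p.1 == cg)).map (fun p => p.2))).length : Int))]
  have hK : (PySem.Set.ofList (ds.flatMap (fun dd => dd.map pvKey))).toFinset
      = ((pvPairs ds).map (fun p => p.1)).toFinset := by
    rw [hfst]
    ext c
    simp [List.mem_toFinset, PySem.Set.mem_ofList]
  rw [pv_count (pvPairs ds) _ hKnodup hK]
  rw [pv_setCard]
  have hlenK : (PySem.Set.ofList (ds.flatMap (fun dd => dd.map pvKey))).length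
      = (ds.flatMap (fun dd => dd.map pvKey)).toFinset.card := pv_setCard _
  rw [hlenK]

-- ---- B-side: the streaming fold ----

-- every index produced by enumerate from s is ≥ s
lemma pv_enum_snd_ge : ∀ (ds : List (List String)) (s : Int) (ji : Int × List String),
    ji ∈ PySem.List.enumerate ds s → s ≤ ji.1 := by
  intro ds
  induction ds with
  | nil => intro s ji h; cases h
  | cons x t ih =>
    intro s ji h
    rw [pv_enum_cons] at h
    rcases List.mem_cons.mp h with h | h
    · subst h; exact le_refl _
    · exact le_trans (by omega) (ih (s + 1) ji h)

-- distinct pairs = sum over districts of that district's distinct-county count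
lemma pv_pairs_card : ∀ (ds : List (List String)) (s : Int),
    ((PySem.List.enumerate ds s).flatMap (fun ji => ji.2.map (fun g => (pvKey g, ji.1)))).toFinset.card
      = (ds.map (fun d => (pvCfin d).card)).sum := by
  intro ds
  induction ds with
  | nil => intro s; rfl
  | cons x t ih =>
    intro s
    rw [pv_enum_cons, List.flatMap_cons, List.toFinset_append, List.map_cons, List.sum_cons]
    have hx : (x.map (fun g => ((pvKey g, s) : String × Int))).toFinset
        = (pvCfin x).image (fun c => (c, s)) := by
      ext p
      simp only [List.mem_toFinset, List.mem_map, Finset.mem_image, pvCfin]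
      constructor
      · rintro ⟨g, hg, rfl⟩; exact ⟨pvKey g, ⟨g, hg, rfl⟩, rfl⟩
      · rintro ⟨c, ⟨g, hg, rfl⟩, rfl⟩; exact ⟨g, hg, rfl⟩
    have hdisj : Disjoint ((x.map (fun g => ((pvKey g, s) : String × Int))).toFinset)
        (((PySem.List.enumerate t (s + 1)).flatMap
          (fun ji => ji.2.map (fun g => (pvKey g, ji.1)))).toFinset) := by
      rw [Finset.disjoint_left]
      intro p hp hq
      rw [List.mem_toFinset, List.mem_map] at hp
      obtain ⟨g, _, hg⟩ := hp
      rw [List.mem_toFinset, List.mem_flatMap] at hq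
      obtain ⟨ji, hji, hpji⟩ := hq
      rw [List.mem_map] at hpji
      obtain ⟨g', _, hg'⟩ := hpji
      have h1 : p.2 = s := by rw [← hg]
      have h2 : p.2 = ji.1 := by rw [← hg']
      have := pv_enum_snd_ge t (s + 1) ji hji
      omega
    rw [Finset.card_union_of_disjoint hdisj, hx,
      Finset.card_image_of_injective _ (fun a b h => (Prod.mk.injEq _ _ _ _).mp h |>.1), ih (s + 1)]

lemma pv_Ufin_cons (x : List String) (t : List (List String)) :
    pvUfin (x :: t) = pvCfin x ∪ pvUfin t := by
  simp [pvUfin, pvCfin, List.flatMap_cons, List.toFinset_append]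

-- loop invariant of B's single pass
lemma pv_B_inv : ∀ (ds : List (List String)) (seen : PySem.Set String) (n : Int),
    seen.Nodup →
    (ds.foldl pvStepB (seen, n)).2
        = n + ((ds.map (fun d => (pvCfin d).card)).sum : Int)
          - (((seen.toFinset ∪ pvUfin ds).card : Int) - (seen.toFinset.card : Int)) := by
  intro ds
  induction ds with
  | nil =>
    intro seen n _
    simp [pvUfin]
  | cons x t ih =>
    intro seen n hnd
    rw [List.foldl_cons]
    have hstep : pvStepB (seen, n) x
        = (PySem.Set.update seen (PySem.Set.ofList (x.map pvKey)),
           n + ((PySem.Set.inter (PySem.Set.ofList (x.map pvKey)) seen).length : Int)) := rfl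
    rw [hstep]
    have hnd' : (PySem.Set.update seen (PySem.Set.ofList (x.map pvKey))).Nodup :=
      PySem.Set.nodup_update _ _ hnd
    rw [ih _ _ hnd']
    -- the updated seen, as a Finset
    have hupd : (PySem.Set.update seen (PySem.Set.ofList (x.map pvKey))).toFinset
        = seen.toFinset ∪ pvCfin x := by
      ext c
      simp [List.mem_toFinset, PySem.Set.mem_update, PySem.Set.mem_ofList, pvCfin]
    -- the intersection length, as a Finset card
    have hinter : (PySem.Set.inter (PySem.Set.ofList (x.map pvKey)) seen).length
        = (pvCfin x ∩ seen.toFinset).card := by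
      have hnodupI : (PySem.Set.inter (PySem.Set.ofList (x.map pvKey)) seen).Nodup :=
        PySem.Set.nodup_inter _ _ (PySem.Set.nodup_ofList _)
      rw [← List.toFinset_card_of_nodup hnodupI]
      congr 1
      ext c
      simp [List.mem_toFinset, PySem.Set.mem_inter, PySem.Set.mem_ofList, pvCfin,
        Finset.mem_inter]
    rw [hupd, hinter, pv_Ufin_cons, List.map_cons, List.sum_cons]
    have hie := Finset.card_union_add_card_inter (pvCfin x) seen.toFinset
    have hsub1 : seen.toFinset ⊆ seen.toFinset ∪ pvCfin x := Finset.subset_union_left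
    have hsub2 : seen.toFinset ∪ pvCfin x ⊆ seen.toFinset ∪ (pvCfin x ∪ pvUfin t) := by
      rw [← Finset.union_assoc]; exact Finset.subset_union_left
    have hassoc : (seen.toFinset ∪ pvCfin x) ∪ pvUfin t
        = seen.toFinset ∪ (pvCfin x ∪ pvUfin t) := Finset.union_assoc _ _ _
    rw [hassoc]
    have hcomm : pvCfin x ∪ seen.toFinset = seen.toFinset ∪ pvCfin x := Finset.union_comm _ _
    rw [hcomm] at hie
    have h1 := Finset.card_le_card hsub1
    have h2 := Finset.card_le_card hsub2
    push_cast
    omega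

-- B's value equals the same Finset-card expression
lemma pv_B_val (ds : List (List String)) :
    number_of_county_splits_alt ds
      = ((pvPairs ds).toFinset.card : Int) - ((ds.flatMap (fun dd => dd.map pvKey)).toFinset.card : Int) := by
  have hBdef : number_of_county_splits_alt ds = (ds.foldl pvStepB (([] : PySem.Set String), (0 : Int))).2 := rfl
  rw [hBdef, pv_B_inv ds [] 0 List.nodup_nil]
  have hP : (pvPairs ds).toFinset.card = (ds.map (fun d => (pvCfin d).card)).sum :=
    pv_pairs_card ds 0
  have hU : ([] : PySem.Set String).toFinset ∪ pvUfin ds = pvUfin ds := by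
    simp
  rw [hU, hP]
  simp [pvUfin]

-- ===== VERDICT (by name: the statement is the Claim_ definition above) =====
theorem number_of_county_splits_spec : Claim_equal_number_of_county_splits := by
  intro ds _
  unfold Spec_number_of_county_splits
  rw [pv_A_val, pv_B_val]
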